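-- pv_equiv track=rewrite | github.com/AbdullahBakir97/cortex | packages/cortex-core/cortex/builders/badges.py | _layout_positions
-- ===== SOURCE A (Python) =====
-- SVG_WIDTH = 1200
--
-- BADGE_GAP = 14
--
-- def _layout_positions(
--     n: int, layout: str, columns: int, badge_w: int, badge_h: int
-- ) -> tuple[list[tuple[int, int]], int]:
--     """Compute (x, y) origin for each badge given the layout. Returns (positions, total_height)."""
--     if layout == "grid":
--         cols = max(1, columns)
--         positions = []
--         for i in range(n):
--             row, col = divmod(i, cols)
--             x = col * (badge_w + BADGE_GAP) + 20
--             y = row * (badge_h + BADGE_GAP) + 20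
--             positions.append((x, y))
--         total_h = ((n + cols - 1) // cols) * (badge_h + BADGE_GAP) + 20
--         return positions, total_h
--     if layout == "marquee":
--         # Single line, no wrap — total width is sum of badges; SVG viewBox
--         # only shows the visible window.
--         positions = [(i * (badge_w + BADGE_GAP) + 20, 20) for i in range(n)]
--         return positions, badge_h + 40
--     # row (default): wrap when next badge would exceed SVG_WIDTH.
--     positions = []
--     x, y = 20, 20
--     for _ in range(n):
--         if x + badge_w + 20 > SVG_WIDTH:
--             x = 20
--             y += badge_h + BADGE_GAP
--         positions.append((x, y))
--         x += badge_w + BADGE_GAP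
--     total_h = y + badge_h + 20
--     return positions, total_h
-- ===== SOURCE B (Python) =====
-- SVG_WIDTH = 1200
--
-- BADGE_GAP = 14
--
-- def _layout_positions(
--     n: int, layout: str, columns: int, badge_w: int, badge_h: int
-- ) -> tuple[list[tuple[int, int]], int]:
--     """Place badges in closed form: badge i's column and row come from divmod(i, per-row
--     capacity), so no running cursor is needed; total height follows from the row count."""
--     step = badge_w + BADGE_GAP
--     row_h = badge_h + BADGE_GAP
--     if layout == "grid":
--         cols = max(1, columns)
--         positions = [(i % cols * step + 20, i // cols * row_h + 20) for i in range(n)]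
--         return positions, (n + cols - 1) // cols * row_h + 20
--     if layout == "marquee":
--         return [(i * step + 20, 20) for i in range(n)], badge_h + 40
--     # row (default): capacity = how many badges fit before the right margin.
--     per_row = max(1, (SVG_WIDTH - 40 - badge_w) // step + 1)
--     positions = [(i % per_row * step + 20, i // per_row * row_h + 20) for i in range(n)]
--     rows = (n + per_row - 1) // per_row
--     return positions, max(0, rows - 1) * row_h + badge_h + 40
-- ===== Notes on version B (the rewrite author's own statement) =====
-- stated objective: alternative
-- what changed: The default 'row' branch no longer simulates a running (x,y) cursor badge by badge: it computes the per-row capacity once and places badge i by divmod(i, per_row), deriving total height from the row count; the grid branch likewise becomes a single comprehension. …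
-- outside the precondition, e.g. on _layout_positions(2, 'x', 0, -20, 10): A returns ([(20, 20), (14, 20)], 50), B returns ([(20, 20), (20, 44)], 74); on _layout_positions(1, 'row', 0, 1200, 10): A returns ([(20, 44)], 74), B returns ([(20, 20)], 50)
import Mathlib
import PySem

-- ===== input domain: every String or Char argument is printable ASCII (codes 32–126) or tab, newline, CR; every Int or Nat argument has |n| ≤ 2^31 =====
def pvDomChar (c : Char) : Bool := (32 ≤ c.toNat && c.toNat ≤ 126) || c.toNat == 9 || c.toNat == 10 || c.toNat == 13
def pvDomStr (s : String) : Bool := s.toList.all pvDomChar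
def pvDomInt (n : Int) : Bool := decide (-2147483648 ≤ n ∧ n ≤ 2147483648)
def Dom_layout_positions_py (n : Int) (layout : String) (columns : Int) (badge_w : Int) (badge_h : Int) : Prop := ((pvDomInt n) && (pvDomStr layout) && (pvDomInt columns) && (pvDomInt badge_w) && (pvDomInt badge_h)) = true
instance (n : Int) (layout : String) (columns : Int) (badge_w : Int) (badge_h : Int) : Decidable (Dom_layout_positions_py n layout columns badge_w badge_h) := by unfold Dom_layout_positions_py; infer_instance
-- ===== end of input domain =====

-- B replaces A's stateful row loop by closed-form divmod placement (alternative decomposition,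
-- same asymptotic cost); Pre_ excludes the nonpositive-stride and oversized-badge row corners.

-- ===== PORT A =====
-- the body of A's row-loop ('for _ in range(n): if wrap … append … advance x')
def rowStepA (badge_w badge_h : Int) (st : List (Int × Int) × Int × Int) (_i : Int) :
    List (Int × Int) × Int × Int :=
  let xy := if 1200 < st.2.1 + badge_w + 20 then ((20 : Int), st.2.2 + (badge_h + 14)) else (st.2.1, st.2.2)
  (st.1 ++ [xy], xy.1 + (badge_w + 14), xy.2)

def layout_positions_py (n : Int) (layout : String) (columns : Int) (badge_w : Int) (badge_h : Int) : (List (Int × Int)) × Int :=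
  if layout = "grid" then
    let cols : Int := max 1 columns
    let positions : List (Int × Int) := (PySem.List.pyRange 0 n 1).foldl
      (fun positions i =>
        let row := PySem.Int.floordiv i cols
        let col := PySem.Int.mod i cols
        let x := col * (badge_w + 14) + 20
        let y := row * (badge_h + 14) + 20
        positions ++ [(x, y)]) []
    (positions, PySem.Int.floordiv (n + cols - 1) cols * (badge_h + 14) + 20)
  else if layout = "marquee" then
    ((PySem.List.pyRange 0 n 1).map (fun i => (i * (badge_w + 14) + 20, (20 : Int))), badge_h + 40)
  else
    let st := (PySem.List.pyRange 0 n 1).foldl (rowStepA badge_w badge_h) ([], 20, 20)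
    (st.1, st.2.2 + badge_h + 20)

-- ===== PORT B =====
def layout_positions_py_alt (n : Int) (layout : String) (columns : Int) (badge_w : Int) (badge_h : Int) : (List (Int × Int)) × Int :=
  let step := badge_w + 14
  let row_h := badge_h + 14
  if layout = "grid" then
    let cols : Int := max 1 columns
    ((PySem.List.pyRange 0 n 1).map (fun i =>
        (PySem.Int.mod i cols * step + 20, PySem.Int.floordiv i cols * row_h + 20)),
     PySem.Int.floordiv (n + cols - 1) cols * row_h + 20)
  else if layout = "marquee" then
    ((PySem.List.pyRange 0 n 1).map (fun i => (i * step + 20, (20 : Int))), badge_h + 40)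
  else
    let per_row : Int := max 1 (PySem.Int.floordiv (1200 - 40 - badge_w) step + 1)
    let positions := (PySem.List.pyRange 0 n 1).map (fun i =>
      (PySem.Int.mod i per_row * step + 20, PySem.Int.floordiv i per_row * row_h + 20))
    let rows := PySem.Int.floordiv (n + per_row - 1) per_row
    (positions, max 0 (rows - 1) * row_h + badge_h + 40)

-- ===== PRECONDITION & SPEC =====
-- Pre_ excludes two row-layout corners: a nonpositive stride (badge_w ≤ -14, A's cursor drifts left
-- forever, an artefact of negative widths, and B's capacity division has a nonpositive divisor), and
-- a badge wider than the drawable area (badge_w > 1160 with a badge to place), where no placement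
-- fits and A's accidental choice (leave the first row empty) is as defensible as B's (start at the top).
def Pre_layout_positions_py (n : Int) (layout : String) (columns : Int) (badge_w : Int) (badge_h : Int) : Prop :=
  layout = "grid" ∨ layout = "marquee" ∨ (0 < badge_w + 14 ∧ (badge_w ≤ 1160 ∨ n ≤ 0))
instance (n : Int) (layout : String) (columns : Int) (badge_w : Int) (badge_h : Int) : Decidable (Pre_layout_positions_py n layout columns badge_w badge_h) := by unfold Pre_layout_positions_py; infer_instance

def pvWitness_layout_positions_py : Int × String × Int × Int × Int := (3, "row", 2, 40, 20)

def Spec_layout_positions_py (n : Int) (layout : String) (columns : Int) (badge_w : Int) (badge_h : Int) (out : (List (Int × Int)) × Int) : Prop := out = layout_positions_py_alt n layout columns badge_w badge_h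
instance (n : Int) (layout : String) (columns : Int) (badge_w : Int) (badge_h : Int) (out : (List (Int × Int)) × Int) : Decidable (Spec_layout_positions_py n layout columns badge_w badge_h out) := by unfold Spec_layout_positions_py; infer_instance

-- ===== CLAIM =====
def Claim_equal_layout_positions_py : Prop := ∀ (n : Int) (layout : String) (columns : Int) (badge_w : Int) (badge_h : Int), Dom_layout_positions_py n layout columns badge_w badge_h → Pre_layout_positions_py n layout columns badge_w badge_h → Spec_layout_positions_py n layout columns badge_w badge_h (layout_positions_py n layout columns badge_w badge_h)

-- ===== LEMMAS AND PROOFS =====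

-- The wrap test in terms of the per-row capacity P, and the divmod step facts.
lemma wrap_iff (w : Int) (hw1 : w ≤ 1160) (hw2 : 0 < w + 14) (P : Nat)
    (hP : (P : Int) = PySem.Int.floordiv (1160 - w) (w + 14) + 1) (j : Nat) :
    (1200 < 20 + (j : Int) * (w + 14) + w + 20 ↔ P ≤ j) := by
  have h1 : PySem.Int.floordiv (1160 - w) (w + 14) < (j : Int) ↔ 1160 - w < (j : Int) * (w + 14) :=
    PySem.Int.floordiv_lt_iff_lt_mul hw2
  constructor
  · intro h
    have h2 : 1160 - w < (j : Int) * (w + 14) := by omega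
    have := h1.2 h2
    omega
  · intro h
    have h2 : PySem.Int.floordiv (1160 - w) (w + 14) < (j : Int) := by omega
    have := h1.1 h2
    omega

lemma succ_wrap {P k : Nat} (hP : 0 < P) (h : k % P + 1 = P) :
    (k + 1) % P = 0 ∧ (k + 1) / P = k / P + 1 := by
  have hd := Nat.div_add_mod k P
  have hk : k + 1 = P * (k / P) + P := by omega
  rw [hk]
  exact ⟨by simp, by rw [Nat.mul_add_div hP]; simp [Nat.div_self hP]⟩

lemma succ_nowrap {P k : Nat} (hP : 0 < P) (h : k % P + 1 < P) :
    (k + 1) % P = k % P + 1 ∧ (k + 1) / P = k / P := by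
  have hd := Nat.div_add_mod k P
  have hk : k + 1 = P * (k / P) + (k % P + 1) := by omega
  rw [hk]
  exact ⟨by rw [Nat.mul_add_mod, Nat.mod_eq_of_lt h],
         by rw [Nat.mul_add_div hP]; simp [Nat.div_eq_of_lt h]⟩

lemma rowA_mid (w h : Int) (hw1 : w ≤ 1160) (hw2 : 0 < w + 14) (P : Nat)
    (hP : (P : Int) = PySem.Int.floordiv (1160 - w) (w + 14) + 1) (hPpos : 0 < P)
    (g : Nat → Int) (m : Nat) :
    ((List.range m).map g).foldl (rowStepA w h) ([], 20, 20) =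
      ((List.range m).map (fun (i : Nat) =>
          (20 + ((i % P : Nat) : Int) * (w + 14), 20 + ((i / P : Nat) : Int) * (h + 14))),
       (if m = 0 then (20 : Int) else 20 + (((((m - 1) % P : Nat)) : Int) + 1) * (w + 14)),
       (if m = 0 then (20 : Int) else 20 + ((((m - 1) / P : Nat)) : Int) * (h + 14))) := by
  induction m with
  | zero => simp
  | succ k ih =>
    rw [List.range_succ, List.map_append, List.foldl_append, ih]
    rcases Nat.eq_zero_or_pos k with hk0 | hk0
    · subst hk0
      have hcond : ¬ (1200 < (20 : Int) + w + 20) := by omega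
      simp [rowStepA, hcond]
    · obtain ⟨j, rfl⟩ : ∃ j, k = j + 1 := ⟨k - 1, by omega⟩
      have hkne : j + 1 ≠ 0 := by omega
      have hj : (j + 1) - 1 = j := by omega
      have hjm : j % P < P := Nat.mod_lt _ hPpos
      have hwrapIff := wrap_iff w hw1 hw2 P hP (j % P + 1)
      have hne2 : j + 1 + 1 ≠ 0 := by omega
      have hj2 : (j + 1 + 1) - 1 = j + 1 := by omega
      simp only [if_neg hkne, hj, List.map_cons, List.map_nil, List.foldl_cons, List.foldl_nil,
        rowStepA]
      by_cases hwr : j % P + 1 = P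
      · obtain ⟨hm0, hd0⟩ := succ_wrap hPpos hwr
        have hcond : 1200 < 20 + (((j % P : Nat) : Int) + 1) * (w + 14) + w + 20 := by
          have h3 := hwrapIff.2 (by omega)
          push_cast at h3 ⊢
          convert h3 using 2 <;> push_cast <;> ring
        rw [if_pos hcond]
        simp only [List.map_append, List.map_cons, List.map_nil, Prod.mk.injEq,
          List.append_cancel_left_eq, List.cons.injEq, and_true, if_neg hne2, hj2, hm0, hd0]
        and_intros <;> push_cast <;> ring
      · obtain ⟨hm0, hd0⟩ := succ_nowrap (P := P) (k := j) hPpos (by omega)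
        have hcond : ¬ (1200 < 20 + (((j % P : Nat) : Int) + 1) * (w + 14) + w + 20) := by
          intro hc
          have h3 : P ≤ j % P + 1 := hwrapIff.1 (by push_cast at hc ⊢; linarith)
          omega
        rw [if_neg hcond]
        simp only [List.map_append, List.map_cons, List.map_nil, Prod.mk.injEq,
          List.append_cancel_left_eq, List.cons.injEq, and_true, if_neg hne2, hj2, hm0, hd0]
        and_intros <;> push_cast <;> ring

-- ===== VERDICT =====
theorem layout_positions_py_spec : Claim_equal_layout_positions_py := by
  intro n layout columns badge_w badge_h _ hpre
  unfold Pre_layout_positions_py at hpre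
  unfold Spec_layout_positions_py
  unfold layout_positions_py layout_positions_py_alt
  by_cases hg : layout = "grid"
  · simp only [hg, if_pos]
    rw [PySem.List.foldl_append_singleton_eq_map]
    simp only [Prod.mk.injEq, and_true]
    apply List.map_congr_left
    intro i _
    ring_nf
  by_cases hmq : layout = "marquee"
  · simp [hmq, hg]
  simp only [hg, hmq, if_false]
  rw [PySem.List.pyRange_one]
  simp only [sub_zero, zero_add]
  set m := n.toNat with hm
  obtain ⟨hstep, hrow⟩ : 0 < badge_w + 14 ∧ (badge_w ≤ 1160 ∨ n ≤ 0) := by tauto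
  by_cases hn : 0 < n
  · have hw1 : badge_w ≤ 1160 := by omega
    have hq0 : 0 ≤ PySem.Int.floordiv (1160 - badge_w) (badge_w + 14) := by
      rw [PySem.Int.floordiv_eq_ediv_of_pos hstep]
      exact Int.ediv_nonneg (by omega) (by omega)
    set q := PySem.Int.floordiv (1160 - badge_w) (badge_w + 14) with hqdef
    set P : Nat := q.toNat + 1 with hPdef
    have hP : (P : Int) = q + 1 := by simp only [hPdef]; push_cast; omega
    have hPpos : 0 < P := by omega
    rw [rowA_mid badge_w badge_h hw1 hstep P hP hPpos _ m]
    have hmax : max 1 (q + 1) = (P : Int) := by rw [hP]; omega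
    have hperP : (1200 : Int) - 40 - badge_w = 1160 - badge_w := by ring
    rw [Prod.mk.injEq]
    constructor
    · simp only [List.map_map]
      apply List.map_congr_left
      intro k _
      simp only [Function.comp, hperP, ← hqdef, hmax, PySem.Int.mod_natCast,
        PySem.Int.floordiv_natCast]
      push_cast
      rw [Prod.mk.injEq]
      exact ⟨by ring, by ring⟩
    · -- total heights: rows - 1 = (m-1)/P
      have hmne : m ≠ 0 := by omega
      have hn1 : n - 1 = ((m - 1 : Nat) : Int) := by omega
      have hstep : PySem.Int.floordiv (n + (P : Int) - 1) (P : Int) =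
          PySem.Int.floordiv (n - 1) (P : Int) + 1 := by
        rw [PySem.Int.floordiv_eq_ediv_of_pos (by omega),
            PySem.Int.floordiv_eq_ediv_of_pos (by omega)]
        have : n + (P : Int) - 1 = (n - 1) + 1 * (P : Int) := by ring
        rw [this, Int.add_mul_ediv_right _ _ (by omega : (P : Int) ≠ 0)]
      have hge : 0 ≤ PySem.Int.floordiv (n - 1) (P : Int) := by
        rw [PySem.Int.floordiv_eq_ediv_of_pos (by omega)]
        exact Int.ediv_nonneg (by omega) (by omega)
      simp only [if_neg hmne, hperP, ← hqdef, hmax, hstep, hn1, PySem.Int.floordiv_natCast]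
      rw [show ((((m - 1) / P : Nat) : Int) + 1 - 1 : Int) = (((m - 1) / P : Nat) : Int) by ring,
          max_eq_right (Int.natCast_nonneg _)]
      ring
  · -- n ≤ 0: empty layout on both sides
    have hm0 : m = 0 := by omega
    rw [hm0]
    simp only [List.range_zero, List.map_nil, List.foldl_nil]
    rw [Prod.mk.injEq]
    refine ⟨rfl, ?_⟩
    set p : Int := max 1 (PySem.Int.floordiv (1200 - 40 - badge_w) (badge_w + 14) + 1) with hpdef
    have hppos : 0 < p := by rw [hpdef]; exact lt_of_lt_of_le one_pos (le_max_left _ _)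
    have hrows : PySem.Int.floordiv (n + p - 1) p < 1 := by
      have h1 : PySem.Int.floordiv (n + p - 1) p < 1 ↔ n + p - 1 < 1 * p :=
        PySem.Int.floordiv_lt_iff_lt_mul hppos
      have := h1.2 (by omega)
      omega
    rw [max_eq_left (by omega)]
    ring
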